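-- pv_equiv track=rewrite | github.com/ROCm/cvs | cvs/lib/preflight/rdma_connectivity.py | _failed_peers_from_intra
-- ===== SOURCE A (Python) =====
-- from collections import defaultdict
--
-- def _failed_peers_from_intra(intra_results, groups):
--     """
--     For each node, set of distinct peers in the same partition group with at least one **FAIL** intra test.
--     """
--     failed_peers = defaultdict(set)
--     for pr in intra_results.values():
--         if not isinstance(pr, dict) or pr.get('status') != 'FAIL':
--             continue
--         sn = pr.get('server_node')
--         cn = pr.get('client_node')
--         if not sn or not cn or sn == cn:
--             continue
--         for _gid, nodes in groups.items():
--             node_set = set(nodes)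
--             if sn in node_set and cn in node_set:
--                 failed_peers[sn].add(cn)
--                 failed_peers[cn].add(sn)
--                 break
--     return failed_peers
-- ===== SOURCE B (Python) =====
-- from collections import defaultdict
--
-- def _failed_peers_from_intra(intra_results, groups):
--     """
--     For each node, set of distinct peers in the same partition group with at least one **FAIL** intra test.
--     """
--     # Pass 1: index every unordered pair of distinct co-group nodes once.
--     cogroup_pairs = set()
--     for nodes in groups.values():
--         uniq = list(dict.fromkeys(nodes))
--         for i, a in enumerate(uniq):
--             for b in uniq[i + 1:]:
--                 cogroup_pairs.add((a, b) if a <= b else (b, a))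
--     # Pass 2: one O(1) lookup per FAIL result.
--     failed_peers = defaultdict(set)
--     for pr in intra_results.values():
--         if isinstance(pr, dict) and pr.get('status') == 'FAIL':
--             sn = pr.get('server_node')
--             cn = pr.get('client_node')
--             if sn and cn and sn != cn:
--                 key = (sn, cn) if sn <= cn else (cn, sn)
--                 if key in cogroup_pairs:
--                     failed_peers[sn].add(cn)
--                     failed_peers[cn].add(sn)
--     return failed_peers
-- ===== Notes on version B (the rewrite author's own statement) =====
-- stated objective: alternative
-- what changed: B precomputes a set of all unordered co-group node pairs in one pass over groups, then processes each FAIL result with a single pair-set membership lookup, instead of A's per-result linear scan over all groups with set rebuilding.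
import Mathlib
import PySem

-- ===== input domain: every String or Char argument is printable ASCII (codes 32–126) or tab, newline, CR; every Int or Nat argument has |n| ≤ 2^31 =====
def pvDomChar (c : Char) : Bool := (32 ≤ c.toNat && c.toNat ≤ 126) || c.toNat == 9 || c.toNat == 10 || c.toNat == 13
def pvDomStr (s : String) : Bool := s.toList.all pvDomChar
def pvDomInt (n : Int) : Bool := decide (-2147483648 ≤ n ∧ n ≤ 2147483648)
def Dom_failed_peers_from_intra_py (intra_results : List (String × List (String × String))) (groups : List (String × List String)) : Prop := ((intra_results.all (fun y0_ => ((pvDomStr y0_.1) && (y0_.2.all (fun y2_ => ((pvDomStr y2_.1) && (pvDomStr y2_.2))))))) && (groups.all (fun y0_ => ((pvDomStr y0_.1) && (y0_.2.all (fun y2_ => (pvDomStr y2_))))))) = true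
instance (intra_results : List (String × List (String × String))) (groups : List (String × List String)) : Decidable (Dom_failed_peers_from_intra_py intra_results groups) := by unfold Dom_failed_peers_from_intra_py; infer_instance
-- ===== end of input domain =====

-- B replaces A's per-FAIL-result scan over all groups by a precomputed set of unordered
-- co-group node pairs with one membership lookup per result (alternative decomposition, same results).

-- ===== PORT A =====
-- record the failure pair in the defaultdict (failed_peers[sn].add(cn); failed_peers[cn].add(sn))
def pvRecordPair (fp : PySem.Dict String (PySem.Set String)) (sn cn : String) : PySem.Dict String (PySem.Set String) :=
  let fp1 := fp.insert sn (PySem.Set.add (fp.getD sn PySem.Set.empty) cn)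
  fp1.insert cn (PySem.Set.add (fp1.getD cn PySem.Set.empty) sn)

-- A's inner 'for _gid, nodes in groups.items(): … break'
def pvA_groupLoop (sn cn : String) : List (String × List String) → PySem.Dict String (PySem.Set String) → PySem.Dict String (PySem.Set String)
  | [], fp => fp
  | (_gid, nodes) :: rest, fp =>
    let node_set := PySem.Set.ofList nodes
    if node_set.contains sn && node_set.contains cn then pvRecordPair fp sn cn
    else pvA_groupLoop sn cn rest fp

-- A's loop body for one pr (pr.get(...) = Dict.get?; 'not sn' on a string value = empty or missing)
def pvA_step (gitems : List (String × List String)) (fp : PySem.Dict String (PySem.Set String)) (pr : List (String × String)) : PySem.Dict String (PySem.Set String) :=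
  let prd := PySem.Dict.ofList pr
  if prd.get? "status" ≠ some "FAIL" then fp
  else
    match prd.get? "server_node", prd.get? "client_node" with
    | some sn, some cn => if sn = "" ∨ cn = "" ∨ sn = cn then fp else pvA_groupLoop sn cn gitems fp
    | _, _ => fp

def failed_peers_from_intra_py (intra_results : List (String × List (String × String))) (groups : List (String × List String)) : List (String × List String) :=
  (((PySem.Dict.ofList intra_results).values).foldl (pvA_step (PySem.Dict.ofList groups).items) PySem.Dict.empty).items

-- ===== PORT B =====
-- (sn, cn) normalized to an unordered pair key
def pvNormPair (a b : String) : String × String := if a ≤ b then (a, b) else (b, a)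

-- 'for i, a in enumerate(uniq): for b in uniq[i+1:]: cogroup_pairs.add(norm(a,b))'
def pvAddPairs : List String → PySem.Set (String × String) → PySem.Set (String × String)
  | [], s => s
  | a :: rest, s => pvAddPairs rest (rest.foldl (fun s b => PySem.Set.add s (pvNormPair a b)) s)

-- pass 1 of B: index of all unordered co-group pairs
def pvPairIndex (gvalues : List (List String)) : PySem.Set (String × String) :=
  gvalues.foldl (fun s nodes => pvAddPairs (PySem.List.dedup nodes) s) PySem.Set.empty

-- pass 2 body of B
def pvB_step (idx : PySem.Set (String × String)) (fp : PySem.Dict String (PySem.Set String)) (pr : List (String × String)) : PySem.Dict String (PySem.Set String) :=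
  let prd := PySem.Dict.ofList pr
  if prd.get? "status" = some "FAIL" then
    match prd.get? "server_node", prd.get? "client_node" with
    | some sn, some cn =>
      if sn ≠ "" ∧ cn ≠ "" ∧ sn ≠ cn then
        if idx.contains (pvNormPair sn cn) then pvRecordPair fp sn cn else fp
      else fp
    | _, _ => fp
  else fp

def failed_peers_from_intra_py_alt (intra_results : List (String × List (String × String))) (groups : List (String × List String)) : List (String × List String) :=
  let idx := pvPairIndex ((PySem.Dict.ofList groups).values)
  (((PySem.Dict.ofList intra_results).values).foldl (pvB_step idx) PySem.Dict.empty).items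

-- ===== PRECONDITION & SPEC =====
def Spec_failed_peers_from_intra_py (intra_results : List (String × List (String × String))) (groups : List (String × List String)) (out : List (String × List String)) : Prop := out = failed_peers_from_intra_py_alt intra_results groups
instance (intra_results : List (String × List (String × String))) (groups : List (String × List String)) (out : List (String × List String)) : Decidable (Spec_failed_peers_from_intra_py intra_results groups out) := by unfold Spec_failed_peers_from_intra_py; infer_instance

-- ===== CLAIM (what is proved, stated in full; the proofs are below) =====
def Claim_equal_failed_peers_from_intra_py : Prop := ∀ (intra_results : List (String × List (String × String))) (groups : List (String × List String)), Dom_failed_peers_from_intra_py intra_results groups → Spec_failed_peers_from_intra_py intra_results groups (failed_peers_from_intra_py intra_results groups)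

-- ===== LEMMAS AND PROOFS =====

theorem pvNormPair_comm (a b : String) : pvNormPair a b = pvNormPair b a := by
  unfold pvNormPair
  rcases le_total a b with h | h
  · by_cases h' : b ≤ a
    · simp [le_antisymm h h']
    · simp [h, h']
  · by_cases h' : a ≤ b
    · simp [le_antisymm h' h]
    · simp [h, h']

theorem pvNormPair_inj {a b sn cn : String} (h : pvNormPair a b = pvNormPair sn cn) :
    (a = sn ∧ b = cn) ∨ (a = cn ∧ b = sn) := by
  unfold pvNormPair at h
  split_ifs at h <;> simp_all [Prod.ext_iff]

theorem mem_foldl_addNorm (a : String) (l : List String) (x : String × String) :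
    ∀ s, x ∈ l.foldl (fun s b => PySem.Set.add s (pvNormPair a b)) s ↔
      x ∈ s ∨ ∃ b ∈ l, x = pvNormPair a b := by
  induction l with
  | nil => simp
  | cons b rest ih =>
    intro s
    simp [List.foldl_cons, ih, PySem.Set.mem_add]
    tauto

theorem mem_pvAddPairs (l : List String) (hl : l.Nodup) (x : String × String) :
    ∀ s, x ∈ pvAddPairs l s ↔
      x ∈ s ∨ ∃ a ∈ l, ∃ b ∈ l, a ≠ b ∧ x = pvNormPair a b := by
  induction l with
  | nil => simp [pvAddPairs]
  | cons a rest ih =>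
    intro s
    obtain ⟨hna, hnr⟩ := List.nodup_cons.mp hl
    rw [pvAddPairs, ih hnr, mem_foldl_addNorm]
    constructor
    · rintro ((h | ⟨b, hb, rfl⟩) | ⟨a', ha', b', hb', hne, rfl⟩)
      · exact Or.inl h
      · right
        exact ⟨a, by simp, b, by simp [hb], fun e => hna (e ▸ hb), rfl⟩
      · right; exact ⟨a', by simp [ha'], b', by simp [hb'], hne, rfl⟩
    · rintro (h | ⟨a', ha', b', hb', hne, rfl⟩)
      · exact Or.inl (Or.inl h)
      · simp at ha' hb'
        rcases ha' with rfl | ha'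
        · rcases hb' with rfl | hb'
          · exact absurd rfl hne
          · exact Or.inl (Or.inr ⟨b', hb', rfl⟩)
        · rcases hb' with rfl | hb'
          · exact Or.inl (Or.inr ⟨a', ha', pvNormPair_comm _ _⟩)
          · exact Or.inr ⟨a', ha', b', hb', hne, rfl⟩

theorem mem_pvPairIndex_aux (gvalues : List (List String)) (x : String × String) :
    ∀ s, x ∈ gvalues.foldl (fun s nodes => pvAddPairs (PySem.List.dedup nodes) s) s ↔
      x ∈ s ∨ ∃ nodes ∈ gvalues, ∃ a ∈ nodes, ∃ b ∈ nodes, a ≠ b ∧ x = pvNormPair a b := by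
  induction gvalues with
  | nil => simp
  | cons nodes rest ih =>
    intro s
    rw [List.foldl_cons, ih, mem_pvAddPairs _ (PySem.List.nodup_dedup nodes)]
    simp
    exact or_assoc

theorem contains_pvPairIndex (gvalues : List (List String)) (sn cn : String) (hne : sn ≠ cn) :
    (pvPairIndex gvalues).contains (pvNormPair sn cn) = true ↔
      ∃ nodes ∈ gvalues, sn ∈ nodes ∧ cn ∈ nodes := by
  rw [PySem.Set.contains_iff]
  unfold pvPairIndex
  rw [mem_pvPairIndex_aux]
  simp only [PySem.Set.empty]
  constructor
  · rintro (h | ⟨nodes, hn, a, ha, b, hb, hab, heq⟩)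
    · simp at h
    · rcases pvNormPair_inj heq.symm with ⟨rfl, rfl⟩ | ⟨rfl, rfl⟩
      · exact ⟨nodes, hn, ha, hb⟩
      · exact ⟨nodes, hn, hb, ha⟩
  · rintro ⟨nodes, hn, hs, hc⟩
    exact Or.inr ⟨nodes, hn, sn, hs, cn, hc, hne, rfl⟩

theorem set_contains_eq (nodes : List String) (x : String) :
    (PySem.Set.ofList nodes).contains x = decide (x ∈ nodes) := by
  simp [PySem.Set.mem_ofList]

theorem groupLoop_eq (sn cn : String) (gitems : List (String × List String)) (fp : PySem.Dict String (PySem.Set String)) :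
    pvA_groupLoop sn cn gitems fp =
      if gitems.any (fun g => (PySem.Set.ofList g.2).contains sn && (PySem.Set.ofList g.2).contains cn)
      then pvRecordPair fp sn cn else fp := by
  induction gitems with
  | nil => simp [pvA_groupLoop]
  | cons g rest ih =>
    obtain ⟨gid, nodes⟩ := g
    rw [pvA_groupLoop, List.any_cons]
    cases h : ((PySem.Set.ofList nodes).contains sn && (PySem.Set.ofList nodes).contains cn) with
    | true => simp
    | false => rw [ih, Bool.false_or]; simp only [Bool.false_eq_true, if_false]

theorem step_eq (groups : List (String × List String)) (fp : PySem.Dict String (PySem.Set String)) (pr : List (String × String)) :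
    pvA_step (PySem.Dict.ofList groups).items fp pr =
      pvB_step (pvPairIndex ((PySem.Dict.ofList groups).values)) fp pr := by
  unfold pvA_step pvB_step
  by_cases hst : (PySem.Dict.ofList pr).get? "status" = some "FAIL"
  · rw [if_neg (by simp [hst]), if_pos hst]
    rcases h1 : (PySem.Dict.ofList pr).get? "server_node" with _ | sn <;>
      rcases h2 : (PySem.Dict.ofList pr).get? "client_node" with _ | cn <;> try rfl
    dsimp only
    by_cases hg : sn = "" ∨ cn = "" ∨ sn = cn
    · rw [if_pos hg, if_neg (by tauto)]
    · rw [if_neg hg, if_pos (by tauto)]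
      push Not at hg
      rw [groupLoop_eq]
      refine if_congr ?_ rfl rfl
      have hval : (PySem.Dict.ofList groups).values =
          ((PySem.Dict.ofList groups).items).map (fun x => x.2) := rfl
      rw [List.any_eq_true, contains_pvPairIndex _ sn cn hg.2.2]
      constructor
      · rintro ⟨g, hgm, hf⟩
        have hm : sn ∈ g.2 ∧ cn ∈ g.2 := by simpa [set_contains_eq] using hf
        exact ⟨g.2, by rw [hval]; exact List.mem_map_of_mem hgm, hm⟩
      · rintro ⟨nodes, hn, hsn, hcn⟩
        rw [hval] at hn
        obtain ⟨g, hgm, rfl⟩ := List.mem_map.mp hn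
        exact ⟨g, hgm, by simp [hsn, hcn]⟩
  · rw [if_pos (by simp [hst]), if_neg hst]

-- ===== VERDICT (by name: the statement is the Claim_ definition above) =====
theorem failed_peers_from_intra_py_spec : Claim_equal_failed_peers_from_intra_py := by
  intro intra_results groups _
  unfold Spec_failed_peers_from_intra_py failed_peers_from_intra_py failed_peers_from_intra_py_alt
  have h : pvA_step (PySem.Dict.ofList groups).items =
      pvB_step (pvPairIndex ((PySem.Dict.ofList groups).values)) :=
    funext fun fp => funext fun pr => step_eq groups fp pr
  rw [h]
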